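-- pv_equiv track=rewrite | github.com/udhayprakash/Python_for_interview_preparation | all/Miscelleneous/longest_substring.py | get_longest_substr
-- ===== SOURCE A (Python) =====
-- def get_longest_substr(sentence):
--     repeat_chars = []
--     temp = sentence[0]
--     for each_char in sentence[1:]:
--         if temp[-1] == each_char:
--             temp += each_char
--         else:
--             repeat_chars.append(temp)
--             temp = each_char
--     longest_substr = ''
--     for index, each_repeat_chars in enumerate(repeat_chars):
--         if index:
--             substr = repeat_chars[index - 1] + each_repeat_chars
--             if len(substr) > len(longest_substr):
--                 longest_substr = ''.join(sorted(substr))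
--     return longest_substr
-- ===== SOURCE B (Python) =====
-- def get_longest_substr(sentence):
--     # Single pass over the characters: track the current run as (char, count) and
--     # the previous completed run; build the best answer directly as min-run + max-run.
--     cur_ch, cur_n = sentence[0], 1
--     prev_ch, prev_n = None, 0
--     best = ''
--     for ch in sentence[1:]:
--         if ch == cur_ch:
--             cur_n += 1
--         else:
--             if prev_n and prev_n + cur_n > len(best):
--                 if prev_ch <= cur_ch:
--                     best = prev_ch * prev_n + cur_ch * cur_n
--                 else:
--                     best = cur_ch * cur_n + prev_ch * prev_n
--             prev_ch, prev_n = cur_ch, cur_n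
--             cur_ch, cur_n = ch, 1
--     return best
-- ===== Notes on version B (the rewrite author's own statement) =====
-- stated objective: alternative
-- what changed: Replaced the build-a-run-list-then-scan-pairs two-phase algorithm by a single fused pass that keeps only the current run as a (char,count) pair and the last completed run, constructing the candidate directly as smaller-char-run ++ larger-char-run instead of sorting the concatenation.
import Mathlib
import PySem

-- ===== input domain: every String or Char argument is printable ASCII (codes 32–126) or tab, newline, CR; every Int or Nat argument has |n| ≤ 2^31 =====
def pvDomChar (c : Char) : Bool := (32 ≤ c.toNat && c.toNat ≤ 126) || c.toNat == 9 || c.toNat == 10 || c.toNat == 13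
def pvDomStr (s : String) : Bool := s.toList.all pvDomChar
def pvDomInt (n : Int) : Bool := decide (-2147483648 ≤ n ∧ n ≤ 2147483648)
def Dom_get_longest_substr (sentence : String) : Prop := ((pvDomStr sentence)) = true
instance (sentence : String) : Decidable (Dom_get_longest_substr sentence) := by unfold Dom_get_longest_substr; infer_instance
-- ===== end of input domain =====

-- B replaces A's two-phase build-run-list-then-scan-adjacent-pairs by one fused pass that keeps
-- only the (char,count) of the current and last completed run and builds candidates directly as
-- smaller-run ++ larger-run instead of sorting; same return value on every non-empty string.


-- ===== PORT A =====
-- first Python loop: build the list of maximal equal-character runs (the last run stays in temp)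
-- temp[-1] is ported with pyGetD: temp is always a nonempty run here, so temp[-1] never raises
def aBuild : List Char → List Char → List (List Char) → List (List Char) × List Char
  | [], temp, acc => (acc, temp)
  | ch :: cs, temp, acc =>
      if PySem.List.pyGetD temp (-1) ' ' = ch then aBuild cs (temp ++ [ch]) acc
      else aBuild cs [ch] (acc ++ [temp])

-- body of the second Python loop; repeat_chars[index-1] via pyGetD (index ≥ 1 is always in range)
def aStep (rcs : List (List Char)) (best : List Char) (p : Int × List Char) : List Char :=
  if p.1 ≠ 0 then
    let substr := PySem.List.pyGetD rcs (p.1 - 1) [] ++ p.2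
    if substr.length > best.length then PySem.List.sorted substr (fun x => x) false else best
  else best

def aScan (rcs : List (List Char)) : List Char :=
  (PySem.List.enumerate rcs 0).foldl (aStep rcs) []

def get_longest_substr (sentence : String) : String :=
  match sentence.toList with
  | [] => ""          -- Python raises IndexError on "" (sentence[0]); excluded by Pre_
  | c :: rest => String.ofList (aScan (aBuild rest [c] []).1)

-- ===== PORT B =====
def bLoop : List Char → Char → Nat → Option (Char × Nat) → List Char → List Char
  | [], _, _, _, best => best
  | ch :: cs, curCh, curN, prev, best =>
      if ch = curCh then bLoop cs curCh (curN + 1) prev best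
      else
        let best' :=
          match prev with
          | some (pc, pn) =>
              if pn + curN > best.length then
                if pc ≤ curCh then List.replicate pn pc ++ List.replicate curN curCh
                else List.replicate curN curCh ++ List.replicate pn pc
              else best
          | none => best
        bLoop cs ch 1 (some (curCh, curN)) best'

def get_longest_substr_alt (sentence : String) : String :=
  match sentence.toList with
  | [] => ""          -- Source B raises IndexError on "" too (sentence[0]); excluded by Pre_
  | c :: rest => String.ofList (bLoop rest c 1 none [])

-- ===== PRECONDITION & SPEC =====
-- Pre_ excludes only the empty string, on which the Python A (and B) raises IndexError at sentence[0]
def Pre_get_longest_substr (sentence : String) : Prop := sentence ≠ ""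
instance (sentence : String) : Decidable (Pre_get_longest_substr sentence) := by unfold Pre_get_longest_substr; infer_instance
def pvWitness_get_longest_substr : String := "xxaabb"

def Spec_get_longest_substr (sentence : String) (out : String) : Prop := out = get_longest_substr_alt sentence
instance (sentence : String) (out : String) : Decidable (Spec_get_longest_substr sentence out) := by unfold Spec_get_longest_substr; infer_instance

-- ===== CLAIM (what is proved, stated in full; the proofs are below) =====
def Claim_equal_get_longest_substr : Prop := ∀ (sentence : String), Dom_get_longest_substr sentence → Pre_get_longest_substr sentence → Spec_get_longest_substr sentence (get_longest_substr sentence)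

-- ===== LEMMAS AND PROOFS =====

-- adjacent-pair scan carrying the previous run explicitly (bridge between the two ports)
def pairScanA : Option (List Char) → List (List Char) → List Char → List Char
  | _, [], b => b
  | none, x :: rest, b => pairScanA (some x) rest b
  | some p, x :: rest, b =>
      pairScanA (some x) rest
        (if (p ++ x).length > b.length then PySem.List.sorted (p ++ x) (fun y => y) false else b)

theorem aBuild_acc (cs : List Char) : ∀ (temp : List Char) (acc : List (List Char)),
    aBuild cs temp acc = (acc ++ (aBuild cs temp []).1, (aBuild cs temp []).2) := by
  induction cs with
  | nil => intro temp acc; simp [aBuild]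
  | cons ch cs ih =>
      intro temp acc
      by_cases h : PySem.List.pyGetD temp (-1) ' ' = ch
      · rw [aBuild, if_pos h, aBuild, if_pos h, ih (temp ++ [ch]) acc]
      · rw [aBuild, if_neg h, aBuild, if_neg h, ih [ch] (acc ++ [temp]),
          ih [ch] ([] ++ [temp])]
        simp

theorem scan_eq (suf : List (List Char)) : ∀ (pre : List (List Char)) (b : List Char),
    (PySem.List.enumerate suf (pre.length : Int)).foldl (aStep (pre ++ suf)) b
      = pairScanA pre.getLast? suf b := by
  induction suf with
  | nil => intro pre b; simp [PySem.List.enumerate_nil, pairScanA]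
  | cons x suf ih =>
      intro pre b
      rw [PySem.List.enumerate_cons]
      simp only [List.foldl_cons]
      have hlist : pre ++ x :: suf = (pre ++ [x]) ++ suf := by simp
      have hlen : ((pre.length : Int) + 1) = (((pre ++ [x]).length : Nat) : Int) := by
        simp
      rw [hlist, hlen, ih (pre ++ [x])]
      have hx : (pre ++ [x]).getLast? = some x := by simp
      rw [hx]
      cases pre with
      | nil =>
          simp [aStep, pairScanA]
      | cons q qs =>
          have hq : (q :: qs) ≠ ([] : List (List Char)) := by simp
          have hn0 : (((q :: qs).length : Nat) : Int) ≠ 0 := by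
            simp only [List.length_cons]; omega
          have hidx : (((q :: qs).length : Nat) : Int) - 1 = (((q :: qs).length - 1 : Nat) : Int) := by
            simp only [List.length_cons]; omega
          have hget : ((q :: qs) ++ [x] ++ suf).getD ((q :: qs).length - 1) [] = (q :: qs).getLast hq := by
            have hlt : qs.length < (q :: qs).length := by simp
            rw [List.append_assoc, List.getD_eq_getElem?_getD,
              List.getElem?_append_left (by simp), List.getLast_eq_getElem]
            simp only [List.length_cons, Nat.add_sub_cancel,
              List.getElem?_eq_getElem hlt, Option.getD_some]
          have hstep : aStep ((q :: qs) ++ [x] ++ suf) b ((((q :: qs).length : Nat) : Int), x)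
              = (if ((q :: qs).getLast hq ++ x).length > b.length
                 then PySem.List.sorted ((q :: qs).getLast hq ++ x) (fun y => y) false
                 else b) := by
            unfold aStep
            rw [if_pos hn0, hidx, PySem.List.pyGetD_natCast, hget]
          rw [hstep, List.getLast?_eq_some_getLast (l := q :: qs) hq]
          simp only [pairScanA]

theorem sorted_two_runs (pc cc : Char) (pn cn : Nat) :
    PySem.List.sorted (List.replicate pn pc ++ List.replicate cn cc) (fun y => y) false
      = (if pc ≤ cc then List.replicate pn pc ++ List.replicate cn cc
         else List.replicate cn cc ++ List.replicate pn pc) := by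
  by_cases h : pc ≤ cc
  · rw [if_pos h]
    apply PySem.List.sorted_eq_self_of_pairwise
    rw [List.pairwise_append]
    refine ⟨List.pairwise_replicate.2 (by simp), List.pairwise_replicate.2 (by simp), ?_⟩
    intro a ha b hb
    rw [List.eq_of_mem_replicate ha, List.eq_of_mem_replicate hb]
    exact h
  · rw [if_neg h]
    apply PySem.List.sorted_id_eq_of_perm_of_pairwise
    · exact List.perm_append_comm
    · rw [List.pairwise_append]
      refine ⟨List.pairwise_replicate.2 (by simp), List.pairwise_replicate.2 (by simp), ?_⟩
      intro a ha b hb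
      rw [List.eq_of_mem_replicate ha, List.eq_of_mem_replicate hb]
      exact le_of_lt (lt_of_not_ge h)

theorem fusion (cs : List Char) : ∀ (cc : Char) (cn : Nat), 1 ≤ cn →
    ∀ (prev : Option (Char × Nat)) (best : List Char),
    bLoop cs cc cn prev best
      = pairScanA (prev.map fun q => List.replicate q.2 q.1)
          ((aBuild cs (List.replicate cn cc) []).1) best := by
  induction cs with
  | nil =>
      intro cc cn hcn prev best
      cases prev <;> simp [bLoop, aBuild, pairScanA]
  | cons ch cs ih =>
      intro cc cn hcn prev best
      have hrep : List.replicate cn cc ≠ [] := by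
        simp; omega
      have hlast : PySem.List.pyGetD (List.replicate cn cc) (-1) ' ' = cc := by
        rw [PySem.List.pyGetD_neg_one _ ' ' hrep]
        exact List.getLast_replicate ..
      simp only [bLoop, aBuild, hlast]
      by_cases h : ch = cc
      · rw [if_pos h, if_pos h.symm]
        rw [show List.replicate cn cc ++ [ch] = List.replicate (cn + 1) cc by
          rw [h, List.replicate_succ']]
        exact ih cc (cn + 1) (by omega) prev best
      · rw [if_neg h, if_neg (fun hh => h hh.symm)]
        rw [aBuild_acc cs [ch] ([] ++ [List.replicate cn cc])]
        simp only [List.nil_append, List.singleton_append]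
        rw [show ([ch] : List Char) = List.replicate 1 ch from rfl]
        rw [ih ch 1 (by omega) (some (cc, cn))]
        cases prev with
        | none => simp [pairScanA]
        | some q =>
            obtain ⟨pc, pn⟩ := q
            simp only [Option.map_some, pairScanA]
            congr 1
            rw [sorted_two_runs]
            have hl : (List.replicate pn pc ++ List.replicate cn cc).length = pn + cn := by simp
            simp only [hl]

-- ===== VERDICT (by name: the statement is the Claim_ definition above) =====
theorem get_longest_substr_spec : Claim_equal_get_longest_substr := by
  intro sentence _ _
  unfold Spec_get_longest_substr get_longest_substr get_longest_substr_alt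
  cases hcl : sentence.toList with
  | nil => rfl
  | cons c rest =>
      have h1 : aScan (aBuild rest [c] []).1 = pairScanA none (aBuild rest [c] []).1 [] := by
        unfold aScan
        have := scan_eq (aBuild rest [c] []).1 [] []
        simpa using this
      have h2 : bLoop rest c 1 none [] = pairScanA none (aBuild rest [c] []).1 [] := by
        have := fusion rest c 1 (by omega) none []
        simpa using this
      show String.ofList (aScan (aBuild rest [c] []).1) = String.ofList (bLoop rest c 1 none [])
      rw [h1, h2]
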